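-- pv_equiv track=rewrite | github.com/huxiaolongyin/Chat2RAG | chat2rag/utils/stream.py | _extract_complete_tags
-- ===== SOURCE A (Python) =====
-- def _extract_complete_tags(text: str):
--     """
--     Extract complete behavior tags from text and return clean text with remaining buffer.
--
--     Returns:
--         tuple: (clean_text, remaining_buffer, extracted_tags)
--     """
--     clean_text = ""
--     remaining_buffer = ""
--     extracted_tags = {"emoji": "", "action": "", "link": "", "image": ""}
--
--     i = 0
--     while i < len(text):
--         if text[i] == "[":
--             bracket_start = i
--             tag_end = text.find("]", i)
--
--             if tag_end == -1:
--                 remaining_buffer = text[bracket_start:]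
--                 break
--
--             tag_content = text[i + 1 : tag_end]
--
--             if ":" in tag_content:
--                 tag_type, tag_value = tag_content.split(":", 1)
--                 if tag_type in ("EMOJI", "ACTION", "LINK", "IMAGE"):
--                     if tag_type == "EMOJI" and not extracted_tags["emoji"]:
--                         extracted_tags["emoji"] = tag_value
--                     elif tag_type == "ACTION" and not extracted_tags["action"]:
--                         extracted_tags["action"] = tag_value
--                     elif tag_type == "LINK" and not extracted_tags["link"]:
--                         extracted_tags["link"] = tag_value
--                     elif tag_type == "IMAGE" and not extracted_tags["image"]:
--                         extracted_tags["image"] = tag_value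
--                     i = tag_end + 1
--                     continue
--
--             clean_text += text[i]
--             i += 1
--         else:
--             clean_text += text[i]
--             i += 1
--
--     return clean_text, remaining_buffer, extracted_tags
-- ===== SOURCE B (Python) =====
-- _PREFIXES = (("EMOJI:", "emoji"), ("ACTION:", "action"), ("LINK:", "link"), ("IMAGE:", "image"))
--
--
-- def _extract_complete_tags(text: str):
--     """Single split on ']' then one linear scan per segment; no repeated find."""
--     tags = {"emoji": "", "action": "", "link": "", "image": ""}
--     out = []
--     segments = text.split("]")
--     for seg in segments[:-1]:
--         matched = False
--         for p, ch in enumerate(seg):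
--             if ch == "[":
--                 rest = seg[p + 1:]
--                 for prefix, key in _PREFIXES:
--                     if rest.startswith(prefix):
--                         if not tags[key]:
--                             tags[key] = rest[len(prefix):]
--                         matched = True
--                         break
--                 if matched:
--                     break
--             out.append(ch)
--         if not matched:
--             out.append("]")
--     last = segments[-1]
--     b = last.find("[")
--     if b == -1:
--         out.append(last)
--         return "".join(out), "", tags
--     out.append(last[:b])
--     return "".join(out), last[b:], tags
-- ===== Notes on version B (the rewrite author's own statement) =====
-- stated objective: faster
-- what changed: B splits the text once on ']' and does one linear scan per segment, recognizing a tag by a constant-time prefix test ('EMOJI:' etc.) instead of A's per-character while loop with a repeated find(']') and split(':') re-scanning the tail.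
import Mathlib
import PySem

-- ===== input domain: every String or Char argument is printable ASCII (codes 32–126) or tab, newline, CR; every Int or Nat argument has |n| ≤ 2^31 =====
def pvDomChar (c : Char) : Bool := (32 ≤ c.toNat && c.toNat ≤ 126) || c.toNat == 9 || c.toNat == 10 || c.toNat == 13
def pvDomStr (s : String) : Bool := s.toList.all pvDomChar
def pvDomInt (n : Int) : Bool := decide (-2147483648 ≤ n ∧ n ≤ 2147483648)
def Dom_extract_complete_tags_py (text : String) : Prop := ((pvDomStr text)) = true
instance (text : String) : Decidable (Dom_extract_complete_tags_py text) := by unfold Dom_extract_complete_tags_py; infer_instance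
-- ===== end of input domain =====

-- B replaces A's per-character while loop with a repeated find(']') by one split on ']'
-- plus a single linear scan per segment with constant-time tag-prefix tests (objective: faster).

-- The Python dict {"emoji": …, "action": …, "link": …, "image": …} has four fixed keys that are
-- only overwritten in place, so both ports carry it as this 4-field record and render it as the
-- association list in its (fixed) insertion order.
structure TagSt where
  emoji : List Char
  action : List Char
  link : List Char
  image : List Char
deriving DecidableEq, Repr

-- ===== PORT A =====
-- the elif chain recording a recognized tag only into an empty slot
def updA (tagType tagValue : List Char) (st : TagSt) : TagSt :=
  if tagType = "EMOJI".toList ∧ st.emoji = [] then { st with emoji := tagValue }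
  else if tagType = "ACTION".toList ∧ st.action = [] then { st with action := tagValue }
  else if tagType = "LINK".toList ∧ st.link = [] then { st with link := tagValue }
  else if tagType = "IMAGE".toList ∧ st.image = [] then { st with image := tagValue }
  else st

-- A's while loop over index i, written on the remaining suffix `rem` = text[i:] (all of A's
-- accesses — text[i], text.find("]", i), text[i+1:tag_end], text[bracket_start:] — are relative
-- to i, so the shift is exact).  text.find("]", i) is ported as rem.idxOf? ']' (single-character
-- needle; none = Python's -1).
def aLoop (clean : List Char) (rem : List Char) (st : TagSt) : List Char × List Char × TagSt :=
  match rem with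
  | [] => (clean, [], st)
  | c :: rest =>
    if c = '[' then
      match (c :: rest).idxOf? ']' with
      | none => (clean, c :: rest, st)                       -- remaining_buffer = text[bracket_start:]
      | some j =>
        -- tag_content = text[i+1:tag_end]; tag_type, tag_value = tag_content.split(":", 1)
        if (((c :: rest).take j).drop 1).contains ':' then
          if (((c :: rest).take j).drop 1).takeWhile (· ≠ ':') = "EMOJI".toList ∨
             (((c :: rest).take j).drop 1).takeWhile (· ≠ ':') = "ACTION".toList ∨
             (((c :: rest).take j).drop 1).takeWhile (· ≠ ':') = "LINK".toList ∨
             (((c :: rest).take j).drop 1).takeWhile (· ≠ ':') = "IMAGE".toList then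
            aLoop clean ((c :: rest).drop (j + 1))
              (updA ((((c :: rest).take j).drop 1).takeWhile (· ≠ ':'))
                (((((c :: rest).take j).drop 1).dropWhile (· ≠ ':')).drop 1) st)   -- i = tag_end + 1
          else aLoop (clean ++ [c]) rest st
        else aLoop (clean ++ [c]) rest st
    else aLoop (clean ++ [c]) rest st
termination_by rem.length
decreasing_by
  all_goals simp [List.length_drop]

def extract_complete_tags_py (text : String) : String × String × (List (String × String)) :=
  let r := aLoop [] text.toList ⟨[], [], [], []⟩
  (String.ofList r.1, String.ofList r.2.1,
    [("emoji", String.ofList r.2.2.emoji), ("action", String.ofList r.2.2.action),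
     ("link", String.ofList r.2.2.link), ("image", String.ofList r.2.2.image)])

-- ===== PORT B =====
-- rest.startswith(prefix) for the four prefixes, recording into an empty slot
def tryTag (rest : List Char) (st : TagSt) : Option TagSt :=
  if PySem.Chars.startswith rest "EMOJI:".toList then
    some (if st.emoji = [] then { st with emoji := rest.drop 6 } else st)
  else if PySem.Chars.startswith rest "ACTION:".toList then
    some (if st.action = [] then { st with action := rest.drop 7 } else st)
  else if PySem.Chars.startswith rest "LINK:".toList then
    some (if st.link = [] then { st with link := rest.drop 5 } else st)
  else if PySem.Chars.startswith rest "IMAGE:".toList then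
    some (if st.image = [] then { st with image := rest.drop 6 } else st)
  else none

-- the inner `for p, ch in enumerate(seg)` loop: emits chars into `out` until a '[' whose tail
-- matches a tag prefix (then `some` updated state) or the segment ends (`none`)
def segLoop (out : List Char) (seg : List Char) (st : TagSt) : List Char × Option TagSt :=
  match seg with
  | [] => (out, none)
  | c :: t =>
    if c = '[' then
      match tryTag t st with
      | some st' => (out, some st')
      | none => segLoop (out ++ [c]) t st
    else segLoop (out ++ [c]) t st

-- the outer loop over segments[:-1] plus the final-segment handling (last.find("[") as idxOf?)
def bGo (out : List Char) (segs : List (List Char)) (st : TagSt) : List Char × List Char × TagSt :=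
  match segs with
  | [] => (out, [], st)                                      -- unreachable: split never returns []
  | [last] =>
    match last.idxOf? '[' with
    | none => (out ++ last, [], st)
    | some b => (out ++ last.take b, last.drop b, st)
  | seg :: segs' =>
    match segLoop out seg st with
    | (out', some st') => bGo out' segs' st'
    | (out', none) => bGo (out' ++ [']']) segs' st

def extract_complete_tags_py_alt (text : String) : String × String × (List (String × String)) :=
  let r := bGo [] (text.toList.splitOn ']') ⟨[], [], [], []⟩   -- text.split("]")
  (String.ofList r.1, String.ofList r.2.1,
    [("emoji", String.ofList r.2.2.emoji), ("action", String.ofList r.2.2.action),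
     ("link", String.ofList r.2.2.link), ("image", String.ofList r.2.2.image)])

-- ===== PRECONDITION & SPEC =====
def Spec_extract_complete_tags_py (text : String) (out : String × String × (List (String × String))) : Prop := out = extract_complete_tags_py_alt text
instance (text : String) (out : String × String × (List (String × String))) : Decidable (Spec_extract_complete_tags_py text out) := by unfold Spec_extract_complete_tags_py; infer_instance

-- ===== CLAIM (what is proved, stated in full; the proofs are below) =====
def Claim_equal_extract_complete_tags_py : Prop := ∀ (text : String), Dom_extract_complete_tags_py text → Spec_extract_complete_tags_py text (extract_complete_tags_py text)

-- ===== LEMMAS AND PROOFS =====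

theorem splitOn_eq (l : List Char) : l.splitOn ']' = List.splitOnP (· == ']') l := rfl

theorem splitOn_of_not_mem (l : List Char) (h : ']' ∉ l) : l.splitOn ']' = [l] := by
  induction l with
  | nil => rfl
  | cons c t ih =>
    simp only [List.mem_cons, not_or] at h
    have hc : (c == ']') = false := by
      rw [beq_eq_false_iff_ne]; exact fun e => h.1 e.symm
    rw [splitOn_eq, List.splitOnP_cons, hc, ← splitOn_eq, ih h.2]
    rfl

theorem splitOn_no_sep (u v : List Char) (h : ']' ∉ u) :
    (u ++ ']' :: v).splitOn ']' = u :: v.splitOn ']' := by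
  induction u with
  | nil => rw [List.nil_append, splitOn_eq, List.splitOnP_cons]; simp [splitOn_eq]
  | cons c t ih =>
    simp only [List.mem_cons, not_or] at h
    have hc : (c == ']') = false := by
      rw [beq_eq_false_iff_ne]; exact fun e => h.1 e.symm
    rw [List.cons_append, splitOn_eq, List.splitOnP_cons, hc, ← splitOn_eq, ih h.2]
    rfl

theorem splitOn_cons_ne (c : Char) (l : List Char) (hc : c ≠ ']') (s : List Char)
    (t : List (List Char)) (h : l.splitOn ']' = s :: t) :
    (c :: l).splitOn ']' = (c :: s) :: t := by
  have hc' : (c == ']') = false := by rw [beq_eq_false_iff_ne]; exact hc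
  rw [splitOn_eq, List.splitOnP_cons, hc', ← splitOn_eq, h]
  rfl

theorem splitOn_cons_sep (l : List Char) :
    (']' :: l).splitOn ']' = [] :: l.splitOn ']' := by
  rw [splitOn_eq, List.splitOnP_cons]
  simp [splitOn_eq]

-- splitting at the first ':' (split(':', 1)) recognizes type w iff w ++ ":" is a prefix
theorem parse_prefix (u w : List Char)
    (h1 : u.contains ':' = true) (h2 : u.takeWhile (· ≠ ':') = w) :
    (w ++ [':']) <+: u ∧ (u.dropWhile (· ≠ ':')).drop 1 = u.drop (w.length + 1) := by
  induction u generalizing w with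
  | nil => simp at h1
  | cons c t ih =>
    by_cases hc : c = ':'
    · subst hc
      simp only [List.takeWhile_cons, ne_eq, not_true_eq_false, decide_false] at h2
      subst h2
      refine ⟨⟨t, by simp⟩, ?_⟩
      simp
    · have hct : t.contains ':' = true := by
        rcases (by simpa using h1 : ':' = c ∨ ':' ∈ t) with h | h
        · exact absurd h.symm hc
        · simpa using h
      simp only [List.takeWhile_cons, ne_eq, hc, not_false_eq_true, decide_true] at h2
      obtain ⟨w', rfl⟩ : ∃ w', w = c :: w' := ⟨t.takeWhile (· ≠ ':'), h2.symm⟩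
      have h2' : t.takeWhile (· ≠ ':') = w' := by
        have := List.cons.inj h2
        simpa using this.2
      obtain ⟨hp, hd⟩ := ih _ hct h2'
      refine ⟨?_, ?_⟩
      · rcases hp with ⟨r, hr⟩
        exact ⟨r, by simp [← hr]⟩
      · simpa [List.dropWhile_cons, hc] using hd

theorem parse_of_prefix (u w : List Char) (hw : (':' : Char) ∉ w)
    (h : (w ++ [':']) <+: u) :
    u.contains ':' = true ∧ u.takeWhile (· ≠ ':') = w ∧
      (u.dropWhile (· ≠ ':')).drop 1 = u.drop (w.length + 1) := by
  rcases h with ⟨r, hr⟩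
  have hu : u = w ++ ':' :: r := by rw [← hr]; simp
  subst hu
  clear hr
  induction w with
  | nil => simp
  | cons a w' ih =>
    have ha : a ≠ ':' := fun h => hw (h ▸ List.mem_cons_self)
    have hw' : (':' : Char) ∉ w' := fun h => hw (List.mem_cons_of_mem _ h)
    obtain ⟨ih1, ih2, ih3⟩ := ih hw'
    refine ⟨?_, ?_, ?_⟩
    · simp only [List.cons_append, List.contains_cons, ih1, Bool.or_true]
    · have ih2' := ih2
      simp only [ne_eq, decide_not] at ih2'
      simp [ha, decide_not, ih2']
    · simpa [List.dropWhile_cons, ha] using ih3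

theorem stepChar (out s : List Char) (t : List (List Char)) (st : TagSt) (c : Char)
    (h : c ≠ '[') : bGo out ((c :: s) :: t) st = bGo (out ++ [c]) (s :: t) st := by
  have hb : (c == '[') = false := by simp [h]
  cases t with
  | nil =>
    simp only [bGo, List.idxOf?_cons, hb, Bool.false_eq_true, if_false]
    cases hx : s.idxOf? '[' with
    | none => simp
    | some b => simp [List.take_succ_cons, List.drop_succ_cons]
  | cons t2 ts =>
    simp only [bGo, segLoop, h, if_false]

theorem stepBrNone (out s : List Char) (t : List (List Char)) (st : TagSt)
    (h : tryTag s st = none) (ht : t ≠ []) :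
    bGo out (('[' :: s) :: t) st = bGo (out ++ ['[']) (s :: t) st := by
  cases t with
  | nil => exact absurd rfl ht
  | cons t2 ts => simp [bGo, segLoop, h]

theorem stepBrSome (out s : List Char) (t : List (List Char)) (st st' : TagSt)
    (h : tryTag s st = some st') (ht : t ≠ []) :
    bGo out (('[' :: s) :: t) st = bGo out t st' := by
  cases t with
  | nil => exact absurd rfl ht
  | cons t2 ts => simp [bGo, segLoop, h]

-- A's recognition+update step agrees with B's tryTag on the bracket content u
theorem tryTag_eq_some (u : List Char) (st : TagSt)
    (h1 : u.contains ':' = true)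
    (h2 : u.takeWhile (· ≠ ':') = "EMOJI".toList ∨ u.takeWhile (· ≠ ':') = "ACTION".toList ∨
          u.takeWhile (· ≠ ':') = "LINK".toList ∨ u.takeWhile (· ≠ ':') = "IMAGE".toList) :
    tryTag u st = some (updA (u.takeWhile (· ≠ ':')) ((u.dropWhile (· ≠ ':')).drop 1) st) := by
  rcases h2 with h2 | h2 | h2 | h2 <;>
    obtain ⟨hp, hd⟩ := parse_prefix u _ h1 h2 <;> rw [h2, hd]
  · -- EMOJI
    obtain ⟨r, rfl⟩ : ∃ r, u = "EMOJI:".toList ++ r := by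
      rcases hp with ⟨r, hr⟩
      exact ⟨r, by rw [← hr, show "EMOJI".toList ++ [':'] = "EMOJI:".toList from by decide]⟩
    rw [tryTag, if_pos (by rw [PySem.Chars.startswith_iff]; exact List.prefix_append _ _)]
    by_cases he : st.emoji = [] <;> simp [he, updA]
  · -- ACTION
    obtain ⟨r, rfl⟩ : ∃ r, u = "ACTION:".toList ++ r := by
      rcases hp with ⟨r, hr⟩
      exact ⟨r, by rw [← hr, show "ACTION".toList ++ [':'] = "ACTION:".toList from by decide]⟩
    rw [tryTag,
        show PySem.Chars.startswith ("ACTION:".toList ++ r) "EMOJI:".toList = false by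
          rw [← Bool.not_eq_true, PySem.Chars.startswith_iff]
          intro h
          have h2 := List.prefix_of_prefix_length_le h (List.prefix_append _ _) (by decide)
          revert h2; decide]
    rw [if_neg (by simp),
        if_pos (by rw [PySem.Chars.startswith_iff]; exact List.prefix_append _ _)]
    by_cases he : st.action = [] <;> simp [he, updA]
  · -- LINK
    obtain ⟨r, rfl⟩ : ∃ r, u = "LINK:".toList ++ r := by
      rcases hp with ⟨r, hr⟩
      exact ⟨r, by rw [← hr, show "LINK".toList ++ [':'] = "LINK:".toList from by decide]⟩
    rw [tryTag,
        show PySem.Chars.startswith ("LINK:".toList ++ r) "EMOJI:".toList = false by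
          rw [← Bool.not_eq_true, PySem.Chars.startswith_iff]
          intro h
          have h2 := List.prefix_of_prefix_length_le (List.prefix_append "LINK:".toList r) h
            (by decide)
          revert h2; decide,
        show PySem.Chars.startswith ("LINK:".toList ++ r) "ACTION:".toList = false by
          rw [← Bool.not_eq_true, PySem.Chars.startswith_iff]
          intro h
          have h2 := List.prefix_of_prefix_length_le (List.prefix_append "LINK:".toList r) h
            (by decide)
          revert h2; decide]
    rw [if_neg (by simp), if_neg (by simp),
        if_pos (by rw [PySem.Chars.startswith_iff]; exact List.prefix_append _ _)]
    by_cases he : st.link = [] <;> simp [he, updA]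
  · -- IMAGE
    obtain ⟨r, rfl⟩ : ∃ r, u = "IMAGE:".toList ++ r := by
      rcases hp with ⟨r, hr⟩
      exact ⟨r, by rw [← hr, show "IMAGE".toList ++ [':'] = "IMAGE:".toList from by decide]⟩
    rw [tryTag,
        show PySem.Chars.startswith ("IMAGE:".toList ++ r) "EMOJI:".toList = false by
          rw [← Bool.not_eq_true, PySem.Chars.startswith_iff]
          intro h
          have h2 := List.prefix_of_prefix_length_le h (List.prefix_append _ _) (by decide)
          revert h2; decide,
        show PySem.Chars.startswith ("IMAGE:".toList ++ r) "ACTION:".toList = false by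
          rw [← Bool.not_eq_true, PySem.Chars.startswith_iff]
          intro h
          have h2 := List.prefix_of_prefix_length_le (List.prefix_append "IMAGE:".toList r) h
            (by decide)
          revert h2; decide,
        show PySem.Chars.startswith ("IMAGE:".toList ++ r) "LINK:".toList = false by
          rw [← Bool.not_eq_true, PySem.Chars.startswith_iff]
          intro h
          have h2 := List.prefix_of_prefix_length_le h (List.prefix_append _ _) (by decide)
          revert h2; decide]
    rw [if_neg (by simp), if_neg (by simp), if_neg (by simp),
        if_pos (by rw [PySem.Chars.startswith_iff]; exact List.prefix_append _ _)]
    by_cases he : st.image = [] <;> simp [he, updA]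

theorem tryTag_eq_none (u : List Char) (st : TagSt)
    (h : ¬ (u.contains ':' = true ∧
          (u.takeWhile (· ≠ ':') = "EMOJI".toList ∨ u.takeWhile (· ≠ ':') = "ACTION".toList ∨
           u.takeWhile (· ≠ ':') = "LINK".toList ∨ u.takeWhile (· ≠ ':') = "IMAGE".toList))) :
    tryTag u st = none := by
  rw [tryTag]
  split_ifs with h1 h2 h3 h4
  · exact absurd (by
      obtain ⟨a, b, _⟩ := parse_of_prefix u "EMOJI".toList (by decide)
        (by rw [show "EMOJI".toList ++ [':'] = "EMOJI:".toList by rfl]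
            exact (PySem.Chars.startswith_iff _ _).mp h1)
      exact ⟨a, Or.inl b⟩) h
  · exact absurd (by
      obtain ⟨a, b, _⟩ := parse_of_prefix u "ACTION".toList (by decide)
        (by rw [show "ACTION".toList ++ [':'] = "ACTION:".toList by rfl]
            exact (PySem.Chars.startswith_iff _ _).mp h2)
      exact ⟨a, Or.inr (Or.inl b)⟩) h
  · exact absurd (by
      obtain ⟨a, b, _⟩ := parse_of_prefix u "LINK".toList (by decide)
        (by rw [show "LINK".toList ++ [':'] = "LINK:".toList by rfl]
            exact (PySem.Chars.startswith_iff _ _).mp h3)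
      exact ⟨a, Or.inr (Or.inr (Or.inl b))⟩) h
  · exact absurd (by
      obtain ⟨a, b, _⟩ := parse_of_prefix u "IMAGE".toList (by decide)
        (by rw [show "IMAGE".toList ++ [':'] = "IMAGE:".toList by rfl]
            exact (PySem.Chars.startswith_iff _ _).mp h4)
      exact ⟨a, Or.inr (Or.inr (Or.inr b))⟩) h
  · rfl

theorem main_loop (n : Nat) : ∀ (rem : List Char), rem.length ≤ n → ∀ (out : List Char) (st : TagSt),
    aLoop out rem st = bGo out (rem.splitOn ']') st := by
  induction n with
  | zero =>
    intro rem hlen out st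
    have : rem = [] := List.eq_nil_of_length_eq_zero (Nat.le_zero.mp hlen)
    subst this
    simp [aLoop, bGo]
  | succ n ih =>
    intro rem hlen out st
    match rem with
    | [] => simp [aLoop, bGo]
    | c :: rest =>
      have hrest : rest.length ≤ n := by simpa using hlen
      by_cases hc : c = '['
      · subst hc
        rw [aLoop, if_pos rfl]
        split
        next hj =>
          have hne : ']' ∉ ('[' :: rest) := by
            rw [← PySem.List.index?_eq_none_iff, PySem.List.index?_eq_idxOf?]
            exact hj
          rw [splitOn_of_not_mem _ hne]
          simp [bGo, List.idxOf?_cons]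
        next j hj =>
          obtain ⟨pre, suf, hdecomp, hlenpre, hnotin⟩ :=
            (PySem.List.index?_eq_some_iff ('[' :: rest) ']' j).mp
              (by rw [PySem.List.index?_eq_idxOf?]; exact hj)
          obtain ⟨u, rfl⟩ : ∃ u, pre = '[' :: u := by
            cases pre with
            | nil => exact absurd (List.cons.inj hdecomp.symm).1.symm (by decide)
            | cons p ps => exact ⟨ps, by rw [(List.cons.inj hdecomp).1]⟩
          have hrest_eq : rest = u ++ ']' :: suf := (List.cons.inj hdecomp).2
          have hju : j = u.length + 1 := by simpa using hlenpre.symm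
          have hnu : ']' ∉ u := fun h => hnotin (List.mem_cons_of_mem _ h)
          have hcontent : (('[' :: rest).take j).drop 1 = u := by
            subst hju
            rw [hrest_eq, List.take_succ_cons, List.drop_succ_cons, List.take_left, List.drop_zero]
          have hdrop : ('[' :: rest).drop (j + 1) = suf := by
            subst hju
            rw [hrest_eq, List.drop_succ_cons,
                show u ++ ']' :: suf = (u ++ [']']) ++ suf by simp,
                show u.length + 1 = (u ++ [']']).length by simp, List.drop_left]
          have hsplit : ('[' :: rest).splitOn ']' = ('[' :: u) :: suf.splitOn ']' := by
            rw [show ('[' :: rest) = ('[' :: u) ++ ']' :: suf by rw [hrest_eq]; simp]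
            exact splitOn_no_sep _ _ (by
              intro hmem
              rcases List.mem_cons.mp hmem with h | h
              · exact absurd h.symm (by decide)
              · exact hnu h)
          have hsuf_len : suf.length ≤ n := by
            rw [hrest_eq] at hrest
            simp only [List.length_append, List.length_cons] at hrest
            omega
          rw [hcontent, hdrop, hsplit]
          by_cases hcol : u.contains ':' = true
          · rw [if_pos hcol]
            by_cases hty : u.takeWhile (· ≠ ':') = "EMOJI".toList ∨
                u.takeWhile (· ≠ ':') = "ACTION".toList ∨
                u.takeWhile (· ≠ ':') = "LINK".toList ∨ u.takeWhile (· ≠ ':') = "IMAGE".toList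
            · rw [if_pos hty, ih suf hsuf_len,
                  stepBrSome out u _ st _ (tryTag_eq_some u st hcol hty)
                    (splitOn_eq suf ▸ List.splitOnP_ne_nil _ _)]
            · rw [if_neg hty, ih rest hrest, hrest_eq, splitOn_no_sep _ _ hnu]
              rw [stepBrNone out u _ st (tryTag_eq_none u st (by tauto))
                    (splitOn_eq suf ▸ List.splitOnP_ne_nil _ _)]
          · rw [if_neg hcol, ih rest hrest, hrest_eq, splitOn_no_sep _ _ hnu]
            rw [stepBrNone out u _ st (tryTag_eq_none u st (by tauto))
                  (splitOn_eq suf ▸ List.splitOnP_ne_nil _ _)]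
      · rw [aLoop, if_neg hc, ih rest hrest]
        by_cases hcr : c = ']'
        · subst hcr
          rw [splitOn_cons_sep]
          cases hs : rest.splitOn ']' with
          | nil => exact absurd hs (splitOn_eq rest ▸ List.splitOnP_ne_nil _ _)
          | cons s2 ts => simp [bGo, segLoop]
        · cases hs : rest.splitOn ']' with
          | nil => exact absurd hs (splitOn_eq rest ▸ List.splitOnP_ne_nil _ _)
          | cons s2 ts =>
            rw [splitOn_cons_ne c rest hcr s2 ts hs, stepChar out s2 ts st c hc]

-- ===== VERDICT (by name: the statement is the Claim_ definition above) =====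
theorem extract_complete_tags_py_spec : Claim_equal_extract_complete_tags_py := by
  intro text _
  unfold Spec_extract_complete_tags_py extract_complete_tags_py extract_complete_tags_py_alt
  rw [main_loop text.toList.length text.toList le_rfl]
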